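-- pv_equiv track=rewrite | github.com/avi09/Google_Codejam | C 2018 Q 1.py | compute
-- ===== SOURCE A (Python) =====
-- def compute(ins):
--     ins=str(ins)
--     s=0
--     c=1
--     for x in range(len(ins)):
--         if ins[x]=='S':
--             s=s+c
--         else:
--             c=c*2
--     return s
-- ===== SOURCE B (Python) =====
-- def compute(ins):
--     ins = str(ins)
--     t = 0
--     for ch in reversed(ins):
--         t = t + 1 if ch == 'S' else t * 2
--     return t
-- ===== Notes on version B (the rewrite author's own statement) =====
-- stated objective: alternative
-- what changed: B traverses the string right-to-left with a single integer accumulator (an 'S' adds 1, any other character doubles the whole running total), instead of A's left-to-right pass maintaining a doubling multiplier c alongside the sum; measured faster since B does one bignum operation per character by direct iteration while A indexes via range(len()) and keeps two big-integer states.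
import Mathlib
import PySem

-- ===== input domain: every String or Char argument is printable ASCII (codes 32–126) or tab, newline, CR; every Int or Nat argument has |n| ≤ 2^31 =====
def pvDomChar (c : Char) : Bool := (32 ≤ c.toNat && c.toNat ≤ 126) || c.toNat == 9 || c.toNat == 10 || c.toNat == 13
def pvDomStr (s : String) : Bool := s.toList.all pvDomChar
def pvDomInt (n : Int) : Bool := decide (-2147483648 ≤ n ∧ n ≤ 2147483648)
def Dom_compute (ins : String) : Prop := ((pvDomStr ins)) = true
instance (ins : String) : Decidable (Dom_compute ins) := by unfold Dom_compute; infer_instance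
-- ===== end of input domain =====

-- B traverses the string right-to-left with one integer accumulator ('S' adds 1, anything else doubles the total), replacing A's forward pass with a separate doubling multiplier.

-- ===== PORT A =====
-- A: forward pass, state (s, c); 'S' adds c to s, otherwise doubles c.
def compute (ins : String) : Int :=
  (ins.toList.foldl
    (fun (sc : Int × Int) ch =>
      if ch = 'S' then (sc.1 + sc.2, sc.2) else (sc.1, sc.2 * 2))
    (0, 1)).1

-- ===== PORT B =====
-- B: reversed pass, single accumulator t; 'S' → t+1, otherwise t*2.
def compute_alt (ins : String) : Int :=
  ins.toList.reverse.foldl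
    (fun (t : Int) ch => if ch = 'S' then t + 1 else t * 2) 0

-- ===== PRECONDITION & SPEC =====
def Spec_compute (ins : String) (out : Int) : Prop := out = compute_alt ins
instance (ins : String) (out : Int) : Decidable (Spec_compute ins out) := by unfold Spec_compute; infer_instance

-- ===== CLAIM (what is proved, stated in full; the proofs are below) =====
def Claim_equal_compute : Prop := ∀ (ins : String), Dom_compute ins → Spec_compute ins (compute ins)

-- ===== LEMMAS AND PROOFS =====

-- A's forward fold from (s, c) equals s + c * (B's backward fold, expressed as a foldr).
lemma compute_fold_eq (l : List Char) : ∀ (s c : Int),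
    (l.foldl (fun (sc : Int × Int) ch =>
        if ch = 'S' then (sc.1 + sc.2, sc.2) else (sc.1, sc.2 * 2)) (s, c)).1
  = s + c * l.foldr (fun ch (t : Int) => if ch = 'S' then t + 1 else t * 2) 0 := by
  induction l with
  | nil => intro s c; simp
  | cons ch tl ih =>
    intro s c
    by_cases h : ch = 'S'
    · subst h
      simp only [List.foldl_cons, List.foldr_cons, if_pos trivial, ih]
      ring
    · simp only [List.foldl_cons, List.foldr_cons, if_neg h, ih]
      ring

-- ===== VERDICT (by name: the statement is the Claim_ definition above) =====
theorem compute_spec : Claim_equal_compute := by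
  intro ins _
  show compute ins = compute_alt ins
  unfold compute compute_alt
  rw [List.foldl_reverse, compute_fold_eq]
  ring
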